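-- pv_equiv track=rewrite | github.com/ji282h7/activecampaign-claw | scripts/import_validator.py | _detect_email_column
-- ===== SOURCE A (Python) =====
-- def _detect_email_column(headers: list[str]) -> str | None:
--     candidates = [h for h in headers if h and h.lower().strip() in {"email", "email address", "e-mail"}]
--     if candidates:
--         return candidates[0]
--     for h in headers:
--         if h and "email" in h.lower():
--             return h
--     return None
-- ===== SOURCE B (Python) =====
-- def _detect_email_column(headers: list[str]) -> str | None:
--     first_substr = None
--     for h in headers:
--         if not h:
--             continue
--         if h.lower().strip() in {"email", "email address", "e-mail"}:
--             return h
--         if first_substr is None and "email" in h.lower():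
--             first_substr = h
--     return first_substr
-- ===== Notes on version B (the rewrite author's own statement) =====
-- stated objective: simpler
-- what changed: Replaces A's two full passes (a filter building the exact-match candidate list, then a second loop for substring matches) with one short-circuiting pass that returns on the first exact match and remembers the first substring match in a single variable.
import Mathlib
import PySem

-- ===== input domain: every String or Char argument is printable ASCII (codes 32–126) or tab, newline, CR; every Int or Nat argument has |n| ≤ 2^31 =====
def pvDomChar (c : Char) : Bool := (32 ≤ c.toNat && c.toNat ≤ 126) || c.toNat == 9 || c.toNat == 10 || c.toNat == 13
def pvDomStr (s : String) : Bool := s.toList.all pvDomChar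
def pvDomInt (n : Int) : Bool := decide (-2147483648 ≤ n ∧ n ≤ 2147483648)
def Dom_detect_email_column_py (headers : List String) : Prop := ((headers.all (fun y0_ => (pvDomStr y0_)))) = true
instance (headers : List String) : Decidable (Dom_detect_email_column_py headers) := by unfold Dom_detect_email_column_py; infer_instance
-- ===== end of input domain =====

-- B fuses A's two passes (candidate filter, then substring loop) into a single
-- short-circuiting pass that keeps only the first substring match; same results.


-- ===== PORT A =====
-- h.lower().strip() in {"email", "email address", "e-mail"}
def pvExactEmail (h : String) : Bool :=
  let low := PySem.Str.strip (PySem.Str.lower h)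
  low == "email" || low == "email address" || low == "e-mail"

-- 'email' in h.lower()
def pvSubEmail (h : String) : Bool := PySem.Str.isIn "email" (PySem.Str.lower h)

-- the second loop of A: for h in headers: if h and "email" in h.lower(): return h
def pvFindSub : List String → Option String
  | [] => none
  | h :: t => if h != "" && pvSubEmail h then some h else pvFindSub t

def detect_email_column_py (headers : List String) : Option String :=
  let candidates := headers.filter (fun h => h != "" && pvExactEmail h)
  match candidates with
  | c :: _ => some c
  | [] => pvFindSub headers

-- ===== PORT B =====
-- single pass, first_substr accumulator
def pvGoB : List String → Option String → Option String
  | [], acc => acc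
  | h :: t, acc =>
    if h != "" then
      if pvExactEmail h then some h
      else pvGoB t (if acc.isNone && pvSubEmail h then some h else acc)
    else pvGoB t acc

def detect_email_column_py_alt (headers : List String) : Option String :=
  pvGoB headers none

-- ===== PRECONDITION & SPEC =====
def Spec_detect_email_column_py (headers : List String) (out : Option String) : Prop := out = detect_email_column_py_alt headers
instance (headers : List String) (out : Option String) : Decidable (Spec_detect_email_column_py headers out) := by unfold Spec_detect_email_column_py; infer_instance

-- ===== CLAIM (what is proved, stated in full; the proofs are below) =====
def Claim_equal_detect_email_column_py : Prop := ∀ (headers : List String), Dom_detect_email_column_py headers → Spec_detect_email_column_py headers (detect_email_column_py headers)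

-- ===== LEMMAS AND PROOFS =====
-- Loop invariant for B's single pass: it returns the first exact match if any,
-- otherwise the accumulator if set, otherwise A's substring search result.
lemma pvGoB_eq (headers : List String) (acc : Option String) :
    pvGoB headers acc =
      match headers.filter (fun h => h != "" && pvExactEmail h) with
      | c :: _ => some c
      | [] => match acc with
              | some x => some x
              | none => pvFindSub headers := by
  induction headers generalizing acc with
  | nil => cases acc <;> simp [pvGoB, pvFindSub]
  | cons h t ih =>
    by_cases hne : h != ""
    · by_cases hex : pvExactEmail h
      · simp [pvGoB, hne, hex, pvFindSub, List.filter_cons]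
      · simp only [pvGoB, hne, if_true, hex, if_false, ih, List.filter_cons,
          Bool.and_eq_true, pvFindSub]
        cases hf : t.filter (fun h => h != "" && pvExactEmail h) with
        | cons c cs => simp [hne, hex, hf]
        | nil =>
          cases acc with
          | some x => simp [hne, hex, hf]
          | none =>
            by_cases hs : pvSubEmail h <;> simp [hne, hex, hs, hf]
    · simp only [pvGoB, hne, if_false, ih, List.filter_cons, pvFindSub]
      simp only [Bool.not_eq_true] at hne
      simp [hne]

-- ===== VERDICT (by name: the statement is the Claim_ definition above) =====
theorem detect_email_column_py_spec : Claim_equal_detect_email_column_py := by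
  intro headers _
  unfold Spec_detect_email_column_py detect_email_column_py detect_email_column_py_alt
  rw [pvGoB_eq]
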